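-- pv_equiv track=rewrite | github.com/sonic5739/tarju | COS PRO 문제.py | solution
-- ===== SOURCE A (Python) =====
-- def solution(셔츠사이즈) :
--     조사결과리스트 = [ 0 , 0 , 0 , 0 , 0 , 0 ]
--     for 셔츠 in 셔츠사이즈 :
--         if 셔츠 == "XS":
--             조사결과리스트[0] += 1
--         if 셔츠 == "S":
--             조사결과리스트[1] += 1
--         if 셔츠 == "M":
--             조사결과리스트[2] += 1
--         if 셔츠 == "L":
--             조사결과리스트[3] += 1
--         if 셔츠 == "XL":
--             조사결과리스트[4] += 1
--         if 셔츠 == "XXL":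
--             조사결과리스트[5] += 1
--     return 조사결과리스트
-- ===== SOURCE B (Python) =====
-- def solution(셔츠사이즈):
--     return [셔츠사이즈.count(size) for size in ["XS", "S", "M", "L", "XL", "XXL"]]
-- ===== Notes on version B (the rewrite author's own statement) =====
-- stated objective: idiomatic
-- what changed: Replaces the single accumulating pass with manual index bookkeeping by a list comprehension that computes list.count for each of the six sizes in fixed order.
import Mathlib
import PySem

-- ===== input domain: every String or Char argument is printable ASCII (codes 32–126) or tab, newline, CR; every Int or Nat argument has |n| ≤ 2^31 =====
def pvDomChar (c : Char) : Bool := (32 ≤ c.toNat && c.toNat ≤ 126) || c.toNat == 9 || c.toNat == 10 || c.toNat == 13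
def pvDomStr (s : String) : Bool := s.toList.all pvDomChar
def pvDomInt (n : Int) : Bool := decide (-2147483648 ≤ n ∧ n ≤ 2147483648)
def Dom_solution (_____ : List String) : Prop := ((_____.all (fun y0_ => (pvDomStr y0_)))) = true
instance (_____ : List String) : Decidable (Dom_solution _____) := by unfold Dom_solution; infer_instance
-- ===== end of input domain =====

-- ===== PORT A =====
-- B is an idiomatic list comprehension of per-size counts; A is one accumulating pass with index updates.
def pvStep (l : List Int) (s : String) : List Int :=
  let l := if s = "XS" then l.modify 0 (· + 1) else l
  let l := if s = "S" then l.modify 1 (· + 1) else l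
  let l := if s = "M" then l.modify 2 (· + 1) else l
  let l := if s = "L" then l.modify 3 (· + 1) else l
  let l := if s = "XL" then l.modify 4 (· + 1) else l
  let l := if s = "XXL" then l.modify 5 (· + 1) else l
  l

def solution (_____ : List String) : List Int :=
  _____.foldl pvStep [0, 0, 0, 0, 0, 0]

-- ===== PORT B =====
def solution_alt (_____ : List String) : List Int :=
  ["XS", "S", "M", "L", "XL", "XXL"].map (fun size => (PySem.List.count _____ size : Int))

-- ===== PRECONDITION & SPEC =====
def Spec_solution (_____ : List String) (out : List Int) : Prop := out = solution_alt _____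
instance (_____ : List String) (out : List Int) : Decidable (Spec_solution _____ out) := by unfold Spec_solution; infer_instance

-- ===== CLAIM (what is proved, stated in full; the proofs are below) =====
def Claim_equal_solution : Prop := ∀ (_____ : List String), Dom_solution _____ → Spec_solution _____ (solution _____)

-- ===== LEMMAS AND PROOFS =====

theorem pvStep_eq (a b c d e f : Int) (s : String) :
    pvStep [a, b, c, d, e, f] s =
      [a + (if s = "XS" then 1 else 0), b + (if s = "S" then 1 else 0),
       c + (if s = "M" then 1 else 0), d + (if s = "L" then 1 else 0),
       e + (if s = "XL" then 1 else 0), f + (if s = "XXL" then 1 else 0)] := by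
  unfold pvStep
  split_ifs <;> simp_all [List.modify]

theorem pvFold_eq (xs : List String) (a b c d e f : Int) :
    xs.foldl pvStep [a, b, c, d, e, f] =
      [a + xs.count "XS", b + xs.count "S", c + xs.count "M",
       d + xs.count "L", e + xs.count "XL", f + xs.count "XXL"] := by
  induction xs generalizing a b c d e f with
  | nil => simp
  | cons x xs ih =>
    rw [List.foldl_cons, pvStep_eq, ih]
    simp only [List.count_cons, List.cons.injEq, and_true]
    and_intros <;> (push_cast; split_ifs <;> simp_all <;> ring)

-- ===== VERDICT (by name: the statement is the Claim_ definition above) =====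
theorem solution_spec : Claim_equal_solution := by
  intro xs _
  unfold Spec_solution solution solution_alt
  rw [pvFold_eq]
  simp [PySem.List.count]
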